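-- pv_equiv track=rewrite | github.com/imndevmodeai/ResonantiA-v3 | arche_cognitive_tools.py | _identify_api_requirements
-- ===== SOURCE A (Python) =====
-- from typing import Dict, Any, List, Optional, Union, Tuple
--
-- def _identify_api_requirements(recommendations: List[Dict]) -> List[str]:
--     """Identify external API requirements from recommendations"""
--     api_requirements = []
--
--     for rec in recommendations:
--         tools = rec.get('tools', [])
--         if any('llm' in tool.lower() for tool in tools):
--             api_requirements.append("LLM_API")
--         if any('search' in tool.lower() for tool in tools):
--             api_requirements.append("SEARCH_API")
--         if any('database' in tool.lower() for tool in tools):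
--             api_requirements.append("DATABASE_ACCESS")
--
--     return list(set(api_requirements))
-- ===== SOURCE B (Python) =====
-- def _identify_api_requirements(recommendations):
--     """Identify external API requirements from recommendations.
--     Concatenates all lowercased tool names into one newline-joined blob and runs a
--     single substring test per tag over that blob; since none of the patterns
--     ('llm', 'search', 'database') contain a newline, a match in the blob occurs
--     exactly when some individual tool contains the pattern."""
--     blob = "\n".join(tool.lower() for rec in recommendations
--                      for tool in rec.get('tools', []))
--     tags = set()
--     for sub, tag in (('llm', 'LLM_API'),
--                      ('search', 'SEARCH_API'),
--                      ('database', 'DATABASE_ACCESS')):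
--         if sub in blob:
--             tags.add(tag)
--     return list(tags)
-- ===== Notes on version B (the rewrite author's own statement) =====
-- stated objective: alternative
-- what changed: Instead of per-recommendation triples of any() scans appending duplicate tags for a final set-dedup, B concatenates all lowercased tool names into one newline-separated string and decides each tag by a single substring search over that blob (correct because no pattern contains the separator, so a blob match cannot span two tools), emitting each tag at most once via a table-driven loop.
import Mathlib
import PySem

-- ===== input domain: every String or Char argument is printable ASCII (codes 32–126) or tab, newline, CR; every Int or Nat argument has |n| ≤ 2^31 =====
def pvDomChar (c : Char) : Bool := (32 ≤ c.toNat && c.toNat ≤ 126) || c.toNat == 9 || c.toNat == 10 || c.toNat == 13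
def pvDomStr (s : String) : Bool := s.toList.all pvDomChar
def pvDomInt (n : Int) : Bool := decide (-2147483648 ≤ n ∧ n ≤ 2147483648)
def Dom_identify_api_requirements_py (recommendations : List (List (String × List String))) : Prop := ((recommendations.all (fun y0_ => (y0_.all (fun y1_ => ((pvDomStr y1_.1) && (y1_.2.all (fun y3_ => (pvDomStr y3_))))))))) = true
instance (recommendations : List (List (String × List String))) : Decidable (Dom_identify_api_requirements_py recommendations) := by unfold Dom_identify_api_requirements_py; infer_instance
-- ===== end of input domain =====

-- B replaces A's three per-recommendation any() scans (which append duplicate tags for a final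
-- set-dedup) by joining all lowercased tool names into one newline-separated blob and doing one
-- substring search per tag over that blob (no pattern contains the separator, so a blob match
-- cannot span two tools): an alternative single-blob strategy.
-- list(set(..)) closes both Pythons; Python's hash iteration order over a set is not modelled
-- (outputs are compared as sets), so both ports enumerate the final set in sorted order.


-- ===== PORT A =====
-- list(set(xs)): the set value is PySem.Set.ofList xs; its hash iteration order is not modelled,
-- so the enumeration is canonicalised as sorted order (exact as a set; used by both ports).
def pvListOfSet (xs : List String) : List String :=
  @PySem.List.sorted String (List Char) LinearOrder.toPartialOrder.toLT LinearOrder.toDecidableLT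
    (PySem.Set.ofList xs) (fun s => s.toList) false

def identify_api_requirements_py (recommendations : List (List (String × List String))) : List String :=
  let api_requirements := recommendations.foldl (fun acc rec =>
    let tools := PySem.Dict.getD ⟨rec⟩ "tools" []
    let acc := if tools.any (fun tool => PySem.Str.isIn "llm" (PySem.Str.lower tool)) then acc ++ ["LLM_API"] else acc
    let acc := if tools.any (fun tool => PySem.Str.isIn "search" (PySem.Str.lower tool)) then acc ++ ["SEARCH_API"] else acc
    let acc := if tools.any (fun tool => PySem.Str.isIn "database" (PySem.Str.lower tool)) then acc ++ ["DATABASE_ACCESS"] else acc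
    acc) []
  pvListOfSet api_requirements

-- ===== PORT B =====
def identify_api_requirements_py_alt (recommendations : List (List (String × List String))) : List String :=
  let blob := PySem.Str.join "\n"
    (recommendations.flatMap (fun rec => (PySem.Dict.getD ⟨rec⟩ "tools" []).map PySem.Str.lower))
  let tags := [("llm", "LLM_API"), ("search", "SEARCH_API"), ("database", "DATABASE_ACCESS")].foldl
    (fun (tags : PySem.Set String) (st : String × String) =>
      if PySem.Str.isIn st.1 blob then PySem.Set.add tags st.2 else tags)
    PySem.Set.empty
  pvListOfSet tags

-- ===== PRECONDITION & SPEC =====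
def Spec_identify_api_requirements_py (recommendations : List (List (String × List String))) (out : List String) : Prop := out = identify_api_requirements_py_alt recommendations
instance (recommendations : List (List (String × List String))) (out : List String) : Decidable (Spec_identify_api_requirements_py recommendations out) := by unfold Spec_identify_api_requirements_py; infer_instance

-- ===== CLAIM (what is proved, stated in full; the proofs are below) =====
def Claim_equal_identify_api_requirements_py : Prop := ∀ (recommendations : List (List (String × List String))), Dom_identify_api_requirements_py recommendations → Spec_identify_api_requirements_py recommendations (identify_api_requirements_py recommendations)

-- ===== LEMMAS AND PROOFS =====

-- whether some tool of rec contains c (lower-cased)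
def pvHas (c : String) (rec : List (String × List String)) : Bool :=
  (PySem.Dict.getD ⟨rec⟩ "tools" []).any (fun tool => PySem.Str.isIn c (PySem.Str.lower tool))

def pvHasL (recs : List (List (String × List String))) : Bool := recs.any (pvHas "llm")
def pvHasS (recs : List (List (String × List String))) : Bool := recs.any (pvHas "search")
def pvHasD (recs : List (List (String × List String))) : Bool := recs.any (pvHas "database")

-- the canonical (sorted) enumeration of the tag set determined by the three flags
def pvTarget (l s d : Bool) : List String :=
  (if d then ["DATABASE_ACCESS"] else []) ++ (if l then ["LLM_API"] else []) ++ (if s then ["SEARCH_API"] else [])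

-- A's loop body, named
def pvStepA (acc : List String) (rec : List (String × List String)) : List String :=
  let tools := PySem.Dict.getD ⟨rec⟩ "tools" []
  let acc := if tools.any (fun tool => PySem.Str.isIn "llm" (PySem.Str.lower tool)) then acc ++ ["LLM_API"] else acc
  let acc := if tools.any (fun tool => PySem.Str.isIn "search" (PySem.Str.lower tool)) then acc ++ ["SEARCH_API"] else acc
  if tools.any (fun tool => PySem.Str.isIn "database" (PySem.Str.lower tool)) then acc ++ ["DATABASE_ACCESS"] else acc

-- the tags A's loop body appends for one recommendation
def pvTags (r : List (String × List String)) : List String :=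
  (if pvHas "llm" r then ["LLM_API"] else []) ++ (if pvHas "search" r then ["SEARCH_API"] else []) ++
  (if pvHas "database" r then ["DATABASE_ACCESS"] else [])

lemma pvStepA_eq (acc : List String) (r : List (String × List String)) :
    pvStepA acc r = acc ++ pvTags r := by
  simp only [pvStepA, pvTags, pvHas]
  split_ifs <;> simp

lemma foldA_eq (recs : List (List (String × List String))) :
    recs.foldl pvStepA [] = recs.flatMap pvTags := by
  have h : pvStepA = fun acc r => acc ++ pvTags r :=
    funext fun acc => funext fun r => pvStepA_eq acc r
  rw [h, PySem.List.foldl_append_eq_flatMap]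
  simp

lemma mem_pvTags (r : List (String × List String)) (x : String) :
    x ∈ pvTags r ↔ (x = "LLM_API" ∧ pvHas "llm" r) ∨ (x = "SEARCH_API" ∧ pvHas "search" r) ∨
      (x = "DATABASE_ACCESS" ∧ pvHas "database" r) := by
  simp only [pvTags, List.mem_append]
  split_ifs <;> (simp_all; try tauto)

-- a nonempty pattern that avoids c and is a prefix of a ++ c :: b is a prefix of a
lemma pvPrefix_split (p : List Char) (c : Char) (hc : c ∉ p) (hp : p ≠ []) :
    ∀ (a b : List Char), p <+: a ++ c :: b → p <+: a := by
  induction p with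
  | nil => simp at hp
  | cons d p' ih =>
    intro a b h
    cases a with
    | nil =>
      simp only [List.nil_append, List.cons_prefix_cons] at h
      exact absurd (h.1 ▸ List.mem_cons_self) hc
    | cons x a' =>
      simp only [List.cons_append, List.cons_prefix_cons] at h
      obtain ⟨rfl, h2⟩ := h
      by_cases hp' : p' = []
      · subst hp'; simp
      · have := ih (fun hm => hc (List.mem_cons_of_mem _ hm)) hp' a' b h2
        simpa [List.cons_prefix_cons]
    
-- a nonempty pattern that avoids c is an infix of a ++ c :: b iff it is an infix of a or of b
lemma pvInfix_split (p a b : List Char) (c : Char) (hc : c ∉ p) (hp : p ≠ []) :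
    p <:+: a ++ c :: b ↔ (p <:+: a ∨ p <:+: b) := by
  constructor
  · intro h
    have h' : ∃ j, p <+: (a ++ c :: b).drop j := by
      rw [PySem.Chars.exists_prefix_drop_iff_isIn, PySem.Chars.isIn_iff_infix]; exact h
    obtain ⟨j, hj⟩ := h'
    by_cases hja : j ≤ a.length
    · rw [List.drop_append_of_le_length hja] at hj
      have := pvPrefix_split p c hc hp _ _ hj
      left
      rw [← PySem.Chars.isIn_iff_infix, ← PySem.Chars.exists_prefix_drop_iff_isIn]
      exact ⟨j, this⟩
    · rw [List.drop_append] at hj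
      have h1 : a.drop j = [] := List.drop_eq_nil_of_le (by omega)
      have h2 : j - a.length = (j - a.length - 1) + 1 := by omega
      rw [h1, h2, List.nil_append, List.drop_succ_cons] at hj
      right
      rw [← PySem.Chars.isIn_iff_infix, ← PySem.Chars.exists_prefix_drop_iff_isIn]
      exact ⟨j - a.length - 1, hj⟩
  · rintro (⟨s, t, rfl⟩ | ⟨s, t, rfl⟩)
    · exact ⟨s, t ++ c :: b, by simp⟩
    · exact ⟨(a ++ c :: s), t, by simp⟩

-- a nonempty pattern avoiding the separator is an infix of the join iff it is an infix of a part
lemma pvInfix_join (p : List Char) (c : Char) (hc : c ∉ p) (hp : p ≠ []) :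
    ∀ (xs : List (List Char)), p <:+: PySem.Chars.join [c] xs ↔ ∃ x ∈ xs, p <:+: x := by
  intro xs
  induction xs with
  | nil => simp [PySem.Chars.join_nil, List.infix_nil, hp]
  | cons x ys ih =>
    cases ys with
    | nil => simp [PySem.Chars.join_singleton]
    | cons y ys' =>
      rw [PySem.Chars.join_cons_cons, List.append_assoc, List.singleton_append,
        pvInfix_split p x _ c hc hp, ih]
      simp

-- the blob search decides exactly "some tool (lower-cased) contains p"
lemma pvIsIn_blob (p : String) (hc : '\n' ∉ p.toList) (hp : p.toList ≠ [])
    (recs : List (List (String × List String))) :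
    PySem.Str.isIn p (PySem.Str.join "\n"
      (recs.flatMap (fun rec => (PySem.Dict.getD ⟨rec⟩ "tools" []).map PySem.Str.lower)))
    = recs.any (pvHas p) := by
  rw [PySem.Str.isIn_eq]
  apply Bool.eq_iff_iff.mpr
  rw [PySem.Chars.isIn_iff_infix, PySem.Str.toList_join,
    show ("\n" : String).toList = ['\n'] from rfl,
    pvInfix_join p.toList '\n' hc hp, List.any_eq_true]
  constructor
  · rintro ⟨x, hx, hinf⟩
    simp only [List.mem_map, List.mem_flatMap] at hx
    obtain ⟨s, ⟨r, hr, u, hu, rfl⟩, rfl⟩ := hx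
    refine ⟨r, hr, ?_⟩
    unfold pvHas
    rw [List.any_eq_true]
    exact ⟨u, hu, by rw [PySem.Str.isIn_eq, PySem.Chars.isIn_iff_infix]; exact hinf⟩
  · rintro ⟨r, hr, hhas⟩
    unfold pvHas at hhas
    rw [List.any_eq_true] at hhas
    obtain ⟨t, ht, hin⟩ := hhas
    refine ⟨(PySem.Str.lower t).toList, ?_, ?_⟩
    · simp only [List.mem_map, List.mem_flatMap]
      exact ⟨PySem.Str.lower t, ⟨r, hr, t, ht, rfl⟩, rfl⟩
    · rw [PySem.Str.isIn_eq, PySem.Chars.isIn_iff_infix] at hin; exact hin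

lemma pvTarget_pairwise (l s d : Bool) :
    (pvTarget l s d).Pairwise (fun a b => a.toList < b.toList) := by
  cases l <;> cases s <;> cases d <;> decide

lemma pvTarget_nodup (l s d : Bool) : (pvTarget l s d).Nodup := by
  cases l <;> cases s <;> cases d <;> decide

lemma mem_pvTarget (l s d : Bool) (x : String) :
    x ∈ pvTarget l s d ↔ (x = "LLM_API" ∧ l) ∨ (x = "SEARCH_API" ∧ s) ∨ (x = "DATABASE_ACCESS" ∧ d) := by
  cases l <;> cases s <;> cases d <;> simp [pvTarget] <;> tauto

-- A's result is the canonical enumeration of the flag set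
lemma portA_eq (recs : List (List (String × List String))) :
    identify_api_requirements_py recs = pvTarget (pvHasL recs) (pvHasS recs) (pvHasD recs) := by
  show pvListOfSet (recs.foldl pvStepA []) = _
  unfold pvListOfSet
  apply PySem.List.sorted_eq_of_perm_of_pairwise_lt _ _ _ ?_ (pvTarget_pairwise _ _ _)
  rw [List.perm_ext_iff_of_nodup (pvTarget_nodup _ _ _) (PySem.Set.nodup_ofList _)]
  intro x
  rw [mem_pvTarget, PySem.Set.mem_ofList, foldA_eq, List.mem_flatMap]
  simp only [mem_pvTags, pvHasL, pvHasS, pvHasD, List.any_eq_true]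
  constructor
  · rintro (⟨hx, r, hr, hp⟩ | ⟨hx, r, hr, hp⟩ | ⟨hx, r, hr, hp⟩)
    · exact ⟨r, hr, Or.inl ⟨hx, hp⟩⟩
    · exact ⟨r, hr, Or.inr (Or.inl ⟨hx, hp⟩)⟩
    · exact ⟨r, hr, Or.inr (Or.inr ⟨hx, hp⟩)⟩
  · rintro ⟨r, hr, (⟨hx, hp⟩ | ⟨hx, hp⟩ | ⟨hx, hp⟩)⟩
    · exact Or.inl ⟨hx, r, hr, hp⟩
    · exact Or.inr (Or.inl ⟨hx, r, hr, hp⟩)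
    · exact Or.inr (Or.inr ⟨hx, r, hr, hp⟩)

-- B's result is the same canonical enumeration
lemma portB_eq (recs : List (List (String × List String))) :
    identify_api_requirements_py_alt recs = pvTarget (pvHasL recs) (pvHasS recs) (pvHasD recs) := by
  unfold identify_api_requirements_py_alt
  simp only [List.foldl_cons, List.foldl_nil]
  rw [pvIsIn_blob "llm" (by decide) (by decide),
    pvIsIn_blob "search" (by decide) (by decide),
    pvIsIn_blob "database" (by decide) (by decide)]
  show pvListOfSet _ = _
  rw [show recs.any (pvHas "llm") = pvHasL recs from rfl,
    show recs.any (pvHas "search") = pvHasS recs from rfl,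
    show recs.any (pvHas "database") = pvHasD recs from rfl]
  cases pvHasL recs <;> cases pvHasS recs <;> cases pvHasD recs <;> rfl

-- ===== VERDICT (by name: the statement is the Claim_ definition above) =====
theorem identify_api_requirements_py_spec : Claim_equal_identify_api_requirements_py := by
  intro recs _
  unfold Spec_identify_api_requirements_py
  rw [portA_eq, portB_eq]
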